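-- pv_equiv track=rewrite | github.com/nexxeln/aoc-2024 | day-09/2.py | find_leftmost_space
-- ===== SOURCE A (Python) =====
-- def find_leftmost_space(blocks, start, needed_length):
--     i = 0
--     while i < start:
--         if blocks[i] is None:
--             space_start = i
--             length = 0
--             while i < start and blocks[i] is None:
--                 length += 1
--                 i += 1
--             if length >= needed_length:
--                 return space_start
--             i += 1
--         else:
--             i += 1
--     return None
-- ===== SOURCE B (Python) =====
-- def find_leftmost_space(blocks, start, needed_length):
--     # Boundary algorithm: gaps are the index ranges strictly between consecutive
--     # occupied (non-None) positions; scan those boundaries instead of the blocks.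
--     occupied = [i for i in range(start) if blocks[i] is not None]
--     prev = -1
--     for q in occupied + [start]:
--         gap_len = q - prev - 1
--         if gap_len > 0 and gap_len >= needed_length:
--             return prev + 1
--         prev = q
--     return None
-- ===== Notes on version B (the rewrite author's own statement) =====
-- stated objective: alternative
-- what changed: Instead of A's nested index-walking while loops over the blocks, B first collects the occupied (non-None) positions in range(start) and then scans consecutive boundary pairs, returning prev+1 for the first pair whose index difference leaves a nonempty gap of at least needed_length.
-- outside the precondition, e.g. on find_leftmost_space([None, 2], 5, 1): A returns 0, B raises IndexError
import Mathlib
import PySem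

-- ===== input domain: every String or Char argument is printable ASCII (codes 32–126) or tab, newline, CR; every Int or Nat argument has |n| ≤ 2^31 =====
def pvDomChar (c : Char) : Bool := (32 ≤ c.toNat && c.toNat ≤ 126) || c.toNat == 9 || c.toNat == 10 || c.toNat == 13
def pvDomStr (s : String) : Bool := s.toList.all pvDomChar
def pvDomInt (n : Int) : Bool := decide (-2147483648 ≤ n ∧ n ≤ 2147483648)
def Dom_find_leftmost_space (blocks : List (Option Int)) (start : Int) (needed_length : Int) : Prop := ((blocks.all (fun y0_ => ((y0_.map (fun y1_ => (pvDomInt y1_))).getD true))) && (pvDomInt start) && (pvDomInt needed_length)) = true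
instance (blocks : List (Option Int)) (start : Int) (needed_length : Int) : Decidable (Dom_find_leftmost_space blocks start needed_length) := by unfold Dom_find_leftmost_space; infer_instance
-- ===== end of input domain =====

-- B replaces A's nested index-walking while loops by a two-stage boundary algorithm:
-- collect the occupied (non-None) positions, then scan consecutive boundary pairs (objective: alternative).

-- ===== PORT A =====
-- inner while loop: `while i < start and blocks[i] is None: length += 1; i += 1`.
-- The loop is transcribed with a fuel counter: called with fuel = (start - i).toNat, so
-- 'fuel = 0' is exactly the exit condition 'not (i < start)'.
-- (on an out-of-range index Python raises IndexError; that input is outside Pre_ — the port stops there)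
def pvInnerA (blocks : List (Option Int)) : Nat → Int → Int → Int × Int
  | 0, i, len => (len, i)
  | fuel + 1, i, len =>
    match PySem.List.pyGet? blocks i with
    | some none => pvInnerA blocks fuel (i + 1) (len + 1)
    | _ => (len, i)

-- outer while loop of A, fuel-counted (the 'i < start' test is kept explicitly; the fuel
-- only bounds the number of iterations, which is at most start.toNat)
def find_leftmost_space_loopA (blocks : List (Option Int)) (start needed_length : Int) : Nat → Int → Option Int
  | 0, _ => none
  | fuel + 1, i =>
    if i < start then
      match PySem.List.pyGet? blocks i with
      | some none =>
        let p := pvInnerA blocks (start - i).toNat i 0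
        if p.1 ≥ needed_length then some i
        else find_leftmost_space_loopA blocks start needed_length fuel (p.2 + 1)
      | _ => find_leftmost_space_loopA blocks start needed_length fuel (i + 1)
    else none

def find_leftmost_space (blocks : List (Option Int)) (start : Int) (needed_length : Int) : Option Int :=
  find_leftmost_space_loopA blocks start needed_length (start.toNat + 1) 0

-- ===== PORT B =====
-- `blocks[i] is not None` in the comprehension; exact on Pre_ (out of range Python raises, the port filters it out)
def pvOccB (blocks : List (Option Int)) (i : Int) : Bool :=
  match PySem.List.pyGet? blocks i with
  | some (some _) => true
  | _ => false

-- `for q in occupied + [start]: …` with accumulator prev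
def find_leftmost_space_altLoop (needed_length : Int) (prev : Int) : List Int → Option Int
  | [] => none
  | q :: qs =>
    let gap_len := q - prev - 1
    if gap_len > 0 ∧ gap_len ≥ needed_length then some (prev + 1)
    else find_leftmost_space_altLoop needed_length q qs

def find_leftmost_space_alt (blocks : List (Option Int)) (start : Int) (needed_length : Int) : Option Int :=
  let occupied := (PySem.List.pyRange 0 start 1).filter (pvOccB blocks)
  find_leftmost_space_altLoop needed_length (-1) (occupied ++ [start])

-- ===== PRECONDITION & SPEC =====
-- Pre_ excludes start > len(blocks): there both scans can run past the end of the list and raise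
-- IndexError; on some such inputs A happens to return before reaching the end while B's comprehension
-- always scans all of range(start) and raises — an accident of A's early exit (see the cite).
def Pre_find_leftmost_space (blocks : List (Option Int)) (start : Int) (needed_length : Int) : Prop :=
  start ≤ (blocks.length : Int)
instance (blocks : List (Option Int)) (start : Int) (needed_length : Int) : Decidable (Pre_find_leftmost_space blocks start needed_length) := by unfold Pre_find_leftmost_space; infer_instance

def pvWitness_find_leftmost_space : List (Option Int) × Int × Int := ([some 1, none, none, some 2], 4, 2)

def Spec_find_leftmost_space (blocks : List (Option Int)) (start : Int) (needed_length : Int) (out : Option Int) : Prop := out = find_leftmost_space_alt blocks start needed_length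
instance (blocks : List (Option Int)) (start : Int) (needed_length : Int) (out : Option Int) : Decidable (Spec_find_leftmost_space blocks start needed_length out) := by unfold Spec_find_leftmost_space; infer_instance

-- ===== CLAIM (what is proved, stated in full; the proofs are below) =====
def Claim_equal_find_leftmost_space : Prop := ∀ (blocks : List (Option Int)) (start : Int) (needed_length : Int), Dom_find_leftmost_space blocks start needed_length → Pre_find_leftmost_space blocks start needed_length → Spec_find_leftmost_space blocks start needed_length (find_leftmost_space blocks start needed_length)

-- ===== LEMMAS AND PROOFS =====

-- one-step reduction equations for the inner loop
theorem pvInnerA_step (blocks : List (Option Int)) (f : Nat) (i len : Int)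
    (h : PySem.List.pyGet? blocks i = some none) :
    pvInnerA blocks (f + 1) i len = pvInnerA blocks f (i + 1) (len + 1) := by
  rw [pvInnerA, h]

theorem pvInnerA_stop_some (blocks : List (Option Int)) (f : Nat) (i len v : Int)
    (h : PySem.List.pyGet? blocks i = some (some v)) :
    pvInnerA blocks (f + 1) i len = (len, i) := by
  rw [pvInnerA, h]

theorem pvInnerA_stop_none (blocks : List (Option Int)) (f : Nat) (i len : Int)
    (h : PySem.List.pyGet? blocks i = none) :
    pvInnerA blocks (f + 1) i len = (len, i) := by
  rw [pvInnerA, h]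

-- the inner loop's count never decreases
theorem pvInnerA_fst_ge (blocks : List (Option Int)) :
    ∀ (fuel : Nat) (i len : Int), len ≤ (pvInnerA blocks fuel i len).1 := by
  intro fuel
  induction fuel with
  | zero => intro i len; simp [pvInnerA]
  | succ f ih =>
    intro i len
    cases hg : PySem.List.pyGet? blocks i with
    | none => rw [pvInnerA_stop_none blocks f i len hg]
    | some v =>
      cases v with
      | none =>
        rw [pvInnerA_step blocks f i len hg]
        have := ih (i + 1) (len + 1); omega
      | some w => rw [pvInnerA_stop_some blocks f i len w hg]

-- characterisation of A's inner run-consuming loop, in the vocabulary of B: called with its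
-- exact fuel it advances by exactly the counted amount, stays within [i, start], consumes no
-- occupied position (the filtered range is unchanged), and stops on an occupied position or at start.
theorem pvInnerA_spec (blocks : List (Option Int)) (start : Int)
    (hlen : start ≤ (blocks.length : Int)) :
    ∀ (fuel : Nat) (i len : Int), fuel = (start - i).toNat → 0 ≤ i → i ≤ start →
      (pvInnerA blocks fuel i len).1 = len + ((pvInnerA blocks fuel i len).2 - i)
      ∧ i ≤ (pvInnerA blocks fuel i len).2
      ∧ (pvInnerA blocks fuel i len).2 ≤ start
      ∧ (PySem.List.pyRange i start 1).filter (pvOccB blocks)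
          = (PySem.List.pyRange (pvInnerA blocks fuel i len).2 start 1).filter (pvOccB blocks)
      ∧ ((pvInnerA blocks fuel i len).2 < start → pvOccB blocks (pvInnerA blocks fuel i len).2 = true) := by
  intro fuel
  induction fuel with
  | zero =>
    intro i len hf h0 hi
    have : i = start := by omega
    exact ⟨by simp [pvInnerA], by simp [pvInnerA], by simp [pvInnerA, this], by simp [pvInnerA], by simp [pvInnerA]; omega⟩
  | succ f ih =>
    intro i len hf h0 hi
    have hlt : i < start := by omega
    have hr : PySem.List.pyGet? blocks i = some (blocks[i.toNat]) := by
      apply PySem.List.pyGet?_eq_some_getElem <;> omega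
    cases hb : blocks[i.toNat] with
    | none =>
      rw [pvInnerA_step blocks f i len (by rw [hr, hb])]
      obtain ⟨e1, e2, e3, e4, e5⟩ := ih (i + 1) (len + 1) (by omega) (by omega) (by omega)
      refine ⟨by omega, by omega, e3, ?_, e5⟩
      rw [PySem.List.pyRange_one_cons hlt, List.filter_cons,
        if_neg (show ¬ (pvOccB blocks i = true) from by simp [pvOccB, hr, hb])]
      exact e4
    | some v =>
      rw [pvInnerA_stop_some blocks f i len v (by rw [hr, hb])]
      refine ⟨by omega, le_rfl, by omega, rfl, fun _ => ?_⟩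
      simp [pvOccB, hr, hb]

-- the outer loop returns none as soon as i ≥ start, whatever the fuel
theorem pv_loopA_done (blocks : List (Option Int)) (start needed : Int) :
    ∀ (fuel : Nat) (i : Int), ¬ i < start → find_leftmost_space_loopA blocks start needed fuel i = none := by
  intro fuel i h
  cases fuel with
  | zero => rfl
  | succ f => rw [find_leftmost_space_loopA]; simp [h]

-- main invariant: A's outer loop at position i (with enough fuel) equals B's boundary scan
-- on the occupied positions of [i, start) with prev = i - 1
theorem pv_main (blocks : List (Option Int)) (start needed : Int)
    (hlen : start ≤ (blocks.length : Int)) :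
    ∀ (fuel : Nat) (i : Int), (start - i).toNat ≤ fuel → 0 ≤ i →
      find_leftmost_space_loopA blocks start needed fuel i
        = find_leftmost_space_altLoop needed (i - 1)
            (((PySem.List.pyRange i start 1).filter (pvOccB blocks)) ++ [start]) := by
  intro fuel
  induction fuel with
  | zero =>
    intro i hle h0
    have hi : ¬ i < start := by omega
    rw [pv_loopA_done blocks start needed 0 i hi, PySem.List.pyRange_one_eq_nil (by omega)]
    simp only [List.filter_nil, List.nil_append]
    rw [find_leftmost_space_altLoop]
    have : ¬ (start - (i - 1) - 1 > 0 ∧ start - (i - 1) - 1 ≥ needed) := by omega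
    simp only [this, if_false]
    rfl
  | succ n ih =>
    intro i hle h0
    by_cases hi : i < start
    · rw [find_leftmost_space_loopA]
      simp only [hi, if_true]
      have hr : PySem.List.pyGet? blocks i = some (blocks[i.toNat]) := by
        apply PySem.List.pyGet?_eq_some_getElem <;> omega
      rw [PySem.List.pyRange_one_cons hi, List.filter_cons]
      cases hb : blocks[i.toNat] with
      | some v =>
        -- occupied position: zero-length gap on B's side, single step on A's side
        rw [hr, hb]
        have hocc : pvOccB blocks i = true := by simp [pvOccB, hr, hb]
        rw [if_pos hocc, List.cons_append]
        rw [find_leftmost_space_altLoop]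
        have : ¬ (i - (i - 1) - 1 > 0 ∧ i - (i - 1) - 1 ≥ needed) := by omega
        simp only [this, if_false]
        have := ih (i + 1) (by omega) (by omega)
        rw [show (i + 1 - 1 : Int) = i by omega] at this
        exact this
      | none =>
        -- a gap starts at i: A consumes it with the inner loop; on B's side the first boundary
        -- is the end of this run (an occupied position or start itself)
        rw [hr, hb]
        have hocc : pvOccB blocks i = false := by simp [pvOccB, hr, hb]
        rw [if_neg (show ¬ (pvOccB blocks i = true) from by rw [hocc]; simp)]
        obtain ⟨e1, e2, e3, e4, e5⟩ :=
          pvInnerA_spec blocks start hlen (start - i).toNat i 0 rfl h0 (by omega)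
        set p := pvInnerA blocks (start - i).toNat i 0 with hp
        have hf : (start - i).toNat = ((start - i).toNat - 1) + 1 := by omega
        -- run length is at least 1
        have hc1 : 1 ≤ p.1 := by
          rw [hp, hf, pvInnerA_step blocks ((start - i).toNat - 1) i 0 (by rw [hr, hb])]
          have := pvInnerA_fst_ge blocks ((start - i).toNat - 1) (i + 1) (0 + 1); omega
        -- rewrite the filtered tail using e4
        have e4' : (PySem.List.pyRange (i + 1) start 1).filter (pvOccB blocks)
            = (PySem.List.pyRange p.2 start 1).filter (pvOccB blocks) := by
          have := e4
          rw [PySem.List.pyRange_one_cons hi, List.filter_cons,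
            if_neg (show ¬ (pvOccB blocks i = true) from by rw [hocc]; simp)] at this
          exact this
        rw [e4']
        by_cases hend : p.2 < start
        · -- run ends on an occupied position p.2
          have hoccp : pvOccB blocks p.2 = true := e5 hend
          rw [PySem.List.pyRange_one_cons hend, List.filter_cons, if_pos hoccp, List.cons_append]
          rw [find_leftmost_space_altLoop]
          have hgap : p.2 - (i - 1) - 1 = p.1 := by omega
          by_cases hn : p.1 ≥ needed
          · have : (p.2 - (i - 1) - 1 > 0 ∧ p.2 - (i - 1) - 1 ≥ needed) := by omega
            simp only [hn, if_true, this, if_true]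
            congr 1; omega
          · have : ¬ (p.2 - (i - 1) - 1 > 0 ∧ p.2 - (i - 1) - 1 ≥ needed) := by omega
            simp only [hn, if_false, this, if_false]
            have := ih (p.2 + 1) (by omega) (by omega)
            rw [show (p.2 + 1 - 1 : Int) = p.2 by omega] at this
            exact this
        · -- run ends at start: only the sentinel boundary [start] remains
          have hp2 : p.2 = start := by omega
          rw [PySem.List.pyRange_one_eq_nil (by omega)]
          simp only [List.filter_nil, List.nil_append]
          rw [show ([start] : List Int) = start :: [] from rfl, find_leftmost_space_altLoop]
          have hgap : start - (i - 1) - 1 = p.1 := by omega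
          by_cases hn : p.1 ≥ needed
          · have : (start - (i - 1) - 1 > 0 ∧ start - (i - 1) - 1 ≥ needed) := by omega
            simp only [hn, if_true, this, if_true]
            congr 1; omega
          · have : ¬ (start - (i - 1) - 1 > 0 ∧ start - (i - 1) - 1 ≥ needed) := by omega
            simp only [hn, if_false, this, if_false]
            rw [pv_loopA_done blocks start needed n (p.2 + 1) (by omega), find_leftmost_space_altLoop]
    · rw [pv_loopA_done blocks start needed (n + 1) i hi, PySem.List.pyRange_one_eq_nil (by omega)]
      simp only [List.filter_nil, List.nil_append]
      rw [find_leftmost_space_altLoop]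
      have : ¬ (start - (i - 1) - 1 > 0 ∧ start - (i - 1) - 1 ≥ needed) := by omega
      simp only [this, if_false]
      rfl

-- ===== VERDICT (by name: the statement is the Claim_ definition above) =====
theorem find_leftmost_space_spec : Claim_equal_find_leftmost_space := by
  intro blocks start needed _ hpre
  unfold Spec_find_leftmost_space find_leftmost_space find_leftmost_space_alt
  have := pv_main blocks start needed hpre (start.toNat + 1) 0 (by omega) le_rfl
  rw [show ((0 : Int) - 1) = -1 by norm_num] at this
  exact this
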